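-- pv_equiv track=rewrite | github.com/Scropio-star/New | tableau.py | _closed
-- ===== SOURCE A (Python) =====
-- def _closed(branch):
--     seen = set(branch['formulas'])
--     for f in branch['formulas']:
--         if f.startswith('~'):
--             if f[1:] in seen:
--                 return True
--         else:
--             if '~' + f in seen:
--                 return True
--     return False
-- ===== SOURCE B (Python) =====
-- def _closed(branch):
--     fs = sorted(branch['formulas'])
--     cores = [f[1:] for f in fs if f.startswith('~')]  # sorted: a common '~' prefix preserves order
--     i = j = 0
--     while i < len(fs) and j < len(cores):
--         if fs[i] < cores[j]:
--             i += 1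
--         elif cores[j] < fs[i]:
--             j += 1
--         else:
--             return True
--     return False
-- ===== Notes on version B (the rewrite author's own statement) =====
-- stated objective: alternative
-- what changed: Replaces the hash-set membership scan by sorting the formulas, stripping the '~' off the negated ones (which stays sorted), and detecting a formula/negation pair with a two-pointer merge intersection of the two sorted lists; no hashing or membership test remains.
import Mathlib
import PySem

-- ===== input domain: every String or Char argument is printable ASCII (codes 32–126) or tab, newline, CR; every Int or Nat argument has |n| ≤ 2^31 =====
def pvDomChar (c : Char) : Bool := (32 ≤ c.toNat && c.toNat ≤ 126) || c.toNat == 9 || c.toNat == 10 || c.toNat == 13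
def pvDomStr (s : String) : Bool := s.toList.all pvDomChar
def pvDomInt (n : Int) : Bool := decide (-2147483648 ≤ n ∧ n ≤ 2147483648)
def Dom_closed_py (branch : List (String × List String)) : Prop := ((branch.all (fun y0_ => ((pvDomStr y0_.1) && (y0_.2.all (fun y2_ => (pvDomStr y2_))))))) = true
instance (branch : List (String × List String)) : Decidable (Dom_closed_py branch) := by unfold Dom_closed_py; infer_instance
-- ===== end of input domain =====

-- B replaces A's hash-set membership scan by sort + strip + two-pointer merge intersection; objective: alternative.

-- ===== PORT A =====
-- the for-loop with its early returns, over the remaining formulas (seen is fixed)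
def closedLoop (seen : PySem.Set String) : List String → Bool
  | [] => false
  | f :: rest =>
    if PySem.Str.startswith f "~" then
      if PySem.Set.contains seen (PySem.Str.slice f (some 1) none) then true
      else closedLoop seen rest
    else
      if PySem.Set.contains seen ("~" ++ f) then true
      else closedLoop seen rest

def closed_py (branch : List (String × List String)) : Bool :=
  match (PySem.Dict.mk branch).get? "formulas" with
  | none => false   -- KeyError in Python; excluded by Pre_closed_py
  | some fs => closedLoop (PySem.Set.ofList fs) fs

-- ===== PORT B =====
-- B's while loop over the two indices i, j (early return True on a common element)
def mergeLoop (fs cores : List String) (i j : Nat) : Bool :=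
  if h : i < fs.length ∧ j < cores.length then
    if fs[i] < cores[j] then mergeLoop fs cores (i + 1) j
    else if cores[j] < fs[i] then mergeLoop fs cores i (j + 1)
    else true
  else false
termination_by (fs.length - i) + (cores.length - j)
decreasing_by all_goals omega

def closed_py_alt (branch : List (String × List String)) : Bool :=
  match (PySem.Dict.mk branch).get? "formulas" with
  | none => false   -- KeyError in Python; excluded by Pre_closed_py
  | some raw =>
    let fs := PySem.List.sorted raw (fun x => x) false
    let cores := (fs.filter (fun f => PySem.Str.startswith f "~")).map
      (fun f => PySem.Str.slice f (some 1) none)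
    mergeLoop fs cores 0 0

-- ===== PRECONDITION & SPEC =====
-- Pre_ excludes exactly the dicts without a 'formulas' key, on which Python A raises KeyError.
def Pre_closed_py (branch : List (String × List String)) : Prop :=
  "formulas" ∈ branch.map Prod.fst
instance (branch : List (String × List String)) : Decidable (Pre_closed_py branch) := by
  unfold Pre_closed_py; infer_instance
def pvWitness_closed_py : (List (String × List String)) := [("formulas", ["p", "~p"])]

def Spec_closed_py (branch : List (String × List String)) (out : Bool) : Prop := out = closed_py_alt branch
instance (branch : List (String × List String)) (out : Bool) : Decidable (Spec_closed_py branch out) := by unfold Spec_closed_py; infer_instance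

-- ===== CLAIM (what is proved, stated in full; the proofs are below) =====
def Claim_equal_closed_py : Prop := ∀ (branch : List (String × List String)), Dom_closed_py branch → Pre_closed_py branch → Spec_closed_py branch (closed_py branch)

-- ===== LEMMAS AND PROOFS =====

-- the guard of A's loop body, as a function (proof helper)
def pvGuard (seen : PySem.Set String) (f : String) : Bool :=
  if PySem.Str.startswith f "~" then PySem.Set.contains seen (PySem.Str.slice f (some 1) none)
  else PySem.Set.contains seen ("~" ++ f)

theorem closedLoop_eq_any (seen : PySem.Set String) (l : List String) :
    closedLoop seen l = l.any (pvGuard seen) := by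
  induction l with
  | nil => rfl
  | cons f rest ih =>
    rw [closedLoop, List.any_cons, ← ih]
    unfold pvGuard
    split_ifs <;> simp_all

theorem tilde_toList : ("~" : String).toList = ['~'] := rfl

theorem tilde_append_toList (f : String) : ("~" ++ f).toList = '~' :: f.toList := by
  rw [String.toList_append, tilde_toList]; rfl

theorem startswith_tilde_iff (f : String) :
    PySem.Str.startswith f "~" = true ↔ ∃ t, f.toList = '~' :: t := by
  rw [PySem.Str.startswith_eq, tilde_toList, PySem.Chars.startswith_iff]
  constructor
  · rintro ⟨t, ht⟩
    exact ⟨t, ht.symm⟩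
  · rintro ⟨t, ht⟩
    exact ⟨t, ht.symm⟩

theorem slice_one_toList (f : String) :
    (PySem.Str.slice f (some 1) none).toList = f.toList.drop 1 := by
  rw [PySem.Str.toList_slice, PySem.Chars.slice_eq_listSlice, PySem.List.slice_from] <;> norm_num

theorem slice_one_tilde_append (f : String) :
    PySem.Str.slice ("~" ++ f) (some 1) none = f := by
  apply String.toList_injective
  rw [slice_one_toList, tilde_append_toList, List.drop_one, List.tail_cons]

-- A's guarded existential equals "some negated formula's core is among the formulas"
theorem exists_guard_iff (fs : List String) :
    (∃ f ∈ fs, pvGuard (PySem.Set.ofList fs) f = true) ↔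
      (∃ f ∈ fs, PySem.Str.startswith f "~" = true ∧ PySem.Str.slice f (some 1) none ∈ fs) := by
  constructor
  · rintro ⟨f, hf, hcond⟩
    unfold pvGuard at hcond
    by_cases h : PySem.Str.startswith f "~" = true
    · rw [if_pos h, PySem.Set.contains_iff, PySem.Set.mem_ofList] at hcond
      exact ⟨f, hf, h, hcond⟩
    · rw [if_neg h, PySem.Set.contains_iff, PySem.Set.mem_ofList] at hcond
      refine ⟨"~" ++ f, hcond, ?_, ?_⟩
      · exact (startswith_tilde_iff _).2 ⟨f.toList, tilde_append_toList f⟩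
      · rw [slice_one_tilde_append]; exact hf
  · rintro ⟨f, hf, hstart, hmem⟩
    refine ⟨f, hf, ?_⟩
    unfold pvGuard
    rw [if_pos hstart, PySem.Set.contains_iff, PySem.Set.mem_ofList]
    exact hmem

-- stripping the common '~' off two negated formulas preserves ≤
theorem slice_mono_of_tilde {f g : String}
    (hf : PySem.Str.startswith f "~" = true) (hg : PySem.Str.startswith g "~" = true)
    (hle : f ≤ g) :
    PySem.Str.slice f (some 1) none ≤ PySem.Str.slice g (some 1) none := by
  obtain ⟨tf, htf⟩ := (startswith_tilde_iff f).1 hf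
  obtain ⟨tg, htg⟩ := (startswith_tilde_iff g).1 hg
  rw [← not_lt] at hle ⊢
  intro hlt
  apply hle
  rw [String.lt_iff_toList_lt] at hlt ⊢
  rw [slice_one_toList, slice_one_toList, htf, htg] at hlt
  simp only [List.drop_one, List.tail_cons] at hlt
  rw [htf, htg, List.cons_lt_cons_iff]
  exact Or.inr ⟨rfl, hlt⟩

-- merge-intersection on sorted lists finds exactly the common elements of the suffixes
theorem mergeLoop_iff (fs cores : List String)
    (hfs : fs.Pairwise (· ≤ ·)) (hcs : cores.Pairwise (· ≤ ·)) (i j : Nat) :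
    mergeLoop fs cores i j = true ↔ ∃ x, x ∈ fs.drop i ∧ x ∈ cores.drop j := by
  induction i, j using mergeLoop.induct fs cores with
  | case1 i j h hlt ih =>
    rw [mergeLoop, dif_pos h, if_pos hlt, ih]
    constructor
    · rintro ⟨x, hx1, hx2⟩
      refine ⟨x, ?_, hx2⟩
      rw [List.drop_eq_getElem_cons h.1]
      exact List.mem_cons_of_mem _ hx1
    · rintro ⟨x, hx1, hx2⟩
      refine ⟨x, ?_, hx2⟩
      have hjx : cores[j] ≤ x := by
        rw [List.drop_eq_getElem_cons h.2] at hx2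
        rcases List.mem_cons.1 hx2 with heq | hx2'
        · exact le_of_eq heq.symm
        · exact (List.pairwise_cons.1 ((List.drop_eq_getElem_cons h.2) ▸ hcs.drop)).1 x hx2'
      rw [List.drop_eq_getElem_cons h.1] at hx1
      rcases List.mem_cons.1 hx1 with heq | hx1'
      · rw [heq] at hjx
        exact absurd hlt (not_lt.2 hjx)
      · exact hx1'
  | case2 i j h hnlt hlt ih =>
    rw [mergeLoop, dif_pos h, if_neg hnlt, if_pos hlt, ih]
    constructor
    · rintro ⟨x, hx1, hx2⟩
      refine ⟨x, hx1, ?_⟩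
      rw [List.drop_eq_getElem_cons h.2]
      exact List.mem_cons_of_mem _ hx2
    · rintro ⟨x, hx1, hx2⟩
      refine ⟨x, hx1, ?_⟩
      have hix : fs[i] ≤ x := by
        rw [List.drop_eq_getElem_cons h.1] at hx1
        rcases List.mem_cons.1 hx1 with heq | hx1'
        · exact le_of_eq heq.symm
        · exact (List.pairwise_cons.1 ((List.drop_eq_getElem_cons h.1) ▸ hfs.drop)).1 x hx1'
      rw [List.drop_eq_getElem_cons h.2] at hx2
      rcases List.mem_cons.1 hx2 with heq | hx2'
      · rw [heq] at hix
        exact absurd hlt (not_lt.2 hix)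
      · exact hx2'
  | case3 i j h hnlt1 hnlt2 =>
    rw [mergeLoop, dif_pos h, if_neg hnlt1, if_neg hnlt2]
    have heq : fs[i]'h.1 = cores[j]'h.2 := le_antisymm (not_lt.1 hnlt2) (not_lt.1 hnlt1)
    refine iff_of_true rfl ⟨fs[i]'h.1, ?_, ?_⟩
    · rw [List.drop_eq_getElem_cons h.1]; exact List.mem_cons_self
    · rw [List.drop_eq_getElem_cons h.2, heq]; exact List.mem_cons_self
  | case4 i j h =>
    rw [mergeLoop, dif_neg h]
    apply iff_of_false (by simp)
    rintro ⟨x, hx1, hx2⟩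
    rcases not_and_or.1 h with h1 | h1
    · exact absurd hx1 (by rw [List.drop_eq_nil_of_le (by omega)]; exact List.not_mem_nil)
    · exact absurd hx2 (by rw [List.drop_eq_nil_of_le (by omega)]; exact List.not_mem_nil)

-- ===== VERDICT (by name: the statement is the Claim_ definition above) =====
theorem closed_py_spec : Claim_equal_closed_py := by
  intro branch _ _
  unfold Spec_closed_py closed_py closed_py_alt
  cases h : (PySem.Dict.mk branch).get? "formulas" with
  | none => rfl
  | some raw =>
    simp only []
    have hperm := PySem.List.sorted_perm raw (fun x => x) false
    set fs := PySem.List.sorted raw (fun x => x) false with hfs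
    have hsorted : fs.Pairwise (· ≤ ·) := PySem.List.sorted_pairwise raw (fun x => x)
    have hcsorted :
        ((fs.filter (fun f => PySem.Str.startswith f "~")).map
          (fun f => PySem.Str.slice f (some 1) none)).Pairwise (· ≤ ·) := by
      rw [List.pairwise_map]
      exact (hsorted.filter _).imp_of_mem (fun ha hb hab =>
        slice_mono_of_tilde (List.mem_filter.1 ha).2 (List.mem_filter.1 hb).2 hab)
    rw [Bool.eq_iff_iff, closedLoop_eq_any, List.any_eq_true, exists_guard_iff,
      mergeLoop_iff _ _ hsorted hcsorted 0 0]
    simp only [List.drop_zero]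
    constructor
    · rintro ⟨f, hf, hs, hm⟩
      refine ⟨PySem.Str.slice f (some 1) none, ?_, ?_⟩
      · exact hperm.mem_iff.2 hm
      · exact List.mem_map.2 ⟨f, List.mem_filter.2 ⟨hperm.mem_iff.2 hf, hs⟩, rfl⟩
    · rintro ⟨x, hx1, hx2⟩
      obtain ⟨f, hf, rfl⟩ := List.mem_map.1 hx2
      obtain ⟨hf1, hf2⟩ := List.mem_filter.1 hf
      exact ⟨f, hperm.mem_iff.1 hf1, hf2, hperm.mem_iff.1 hx1⟩
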